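-- pv_equiv track=rewrite | github.com/darkerego/bitsieve | trade_engine/ta_framework.py | unique_sorted
-- ===== SOURCE A (Python) =====
-- from itertools import islice
--
-- def unique_sorted(values):
--     "Return a sorted list of the given values, without duplicates."
--     values = sorted(values)
--     if not values:
--         return []
--     consecutive_pairs = zip(values, islice(values, 1, len(values)))
--     result = [a for (a, b) in consecutive_pairs if a != b]
--     result.append(values[-1])
--     return result
-- ===== SOURCE B (Python) =====
-- def unique_sorted(values):
--     "Return a sorted list of the given values, without duplicates."
--     return sorted(set(values))
-- ===== Notes on version B (the rewrite author's own statement) =====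
-- stated objective: idiomatic
-- what changed: Replaces sort-then-adjacent-pair-dedup (zip/filter plus an explicit empty guard and last-element append) with hash-based deduplication before sorting: sorted(set(values)).
import Mathlib
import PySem

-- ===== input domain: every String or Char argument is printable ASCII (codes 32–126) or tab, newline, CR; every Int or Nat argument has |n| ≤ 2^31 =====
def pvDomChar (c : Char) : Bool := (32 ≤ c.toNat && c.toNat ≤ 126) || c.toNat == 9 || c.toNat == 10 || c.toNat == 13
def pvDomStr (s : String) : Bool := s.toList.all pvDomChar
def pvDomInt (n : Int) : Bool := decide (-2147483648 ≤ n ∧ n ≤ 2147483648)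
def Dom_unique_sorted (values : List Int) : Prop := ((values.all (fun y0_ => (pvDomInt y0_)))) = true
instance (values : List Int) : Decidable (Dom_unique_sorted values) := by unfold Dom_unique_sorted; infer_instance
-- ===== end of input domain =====

-- B replaces A's sort-then-adjacent-pair-dedup (zip/filter + empty guard + last-element append)
-- with the idiomatic sorted(set(values)).


-- ===== PORT A =====
def unique_sorted (values : List Int) : List Int :=
  let vs := PySem.List.sorted values (fun x => x) false
  if vs = [] then []
  else
    let consecutive_pairs := vs.zip (PySem.List.slice vs (some 1) (some (PySem.List.len vs)))
    let result := (consecutive_pairs.filter (fun p => p.1 ≠ p.2)).map Prod.fst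
    -- vs[-1]: exact here since the guard ensures vs ≠ [] (index -1 is in range)
    result ++ [PySem.List.pyGetD vs (-1) 0]

-- ===== PORT B =====
def unique_sorted_alt (values : List Int) : List Int :=
  PySem.List.sorted (PySem.Set.ofList values) (fun x => x) false

-- ===== PRECONDITION & SPEC =====
def Spec_unique_sorted (values : List Int) (out : List Int) : Prop := out = unique_sorted_alt values
instance (values : List Int) (out : List Int) : Decidable (Spec_unique_sorted values out) := by unfold Spec_unique_sorted; infer_instance

-- ===== CLAIM (what is proved, stated in full; the proofs are below) =====
def Claim_equal_unique_sorted : Prop := ∀ (values : List Int), Dom_unique_sorted values → Spec_unique_sorted values (unique_sorted values)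

-- ===== LEMMAS AND PROOFS =====

/-- Adjacent dedup keeping the LAST element of each run (what A's zip/filter/append computes). -/
def pvAdj : List Int → List Int
  | [] => []
  | [a] => [a]
  | a :: b :: t => if a ≠ b then a :: pvAdj (b :: t) else pvAdj (b :: t)

theorem pvAdj_mem : ∀ (s : List Int) (x : Int), x ∈ pvAdj s ↔ x ∈ s
  | [], x => by simp [pvAdj]
  | [a], x => by simp [pvAdj]
  | a :: b :: t, x => by
    by_cases h : a = b
    · subst h
      rw [pvAdj, if_neg (fun hc => hc rfl), pvAdj_mem (a :: t)]
      simp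
    · simp only [pvAdj, if_pos h, List.mem_cons]
      rw [pvAdj_mem (b :: t)]
      simp

theorem pvAdj_pairwise : ∀ (s : List Int), s.Pairwise (· ≤ ·) → (pvAdj s).Pairwise (· < ·)
  | [], _ => by simp [pvAdj]
  | [a], _ => by simp [pvAdj]
  | a :: b :: t, hp => by
    have hab : a ≤ b := (List.pairwise_cons.mp hp).1 b (by simp)
    have hbt : (b :: t).Pairwise (· ≤ ·) := (List.pairwise_cons.mp hp).2
    have ih := pvAdj_pairwise (b :: t) hbt
    by_cases h : a = b
    · simpa [pvAdj, h] using ih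
    · simp only [pvAdj, if_pos h]
      refine List.pairwise_cons.mpr ⟨?_, ih⟩
      intro y hy
      rcases (pvAdj_mem (b :: t) y).mp hy with hy'
      rcases List.mem_cons.mp hy' with rfl | hyt
      · exact lt_of_le_of_ne hab h
      · exact lt_of_lt_of_le (lt_of_le_of_ne hab h)
          ((List.pairwise_cons.mp hbt).1 y hyt)

/-- A's zip/filter/append body equals pvAdj on a nonempty list. -/
theorem pvAdj_eq_zip : ∀ (s : List Int) (h : s ≠ []),
    ((s.zip s.tail).filter (fun p => p.1 ≠ p.2)).map Prod.fst ++ [s.getLast h] = pvAdj s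
  | [a], _ => by simp [pvAdj]
  | a :: b :: t, _ => by
    have ih := pvAdj_eq_zip (b :: t) (by simp)
    by_cases h : a = b
    · simpa [pvAdj, List.zip, h] using ih
    · simp only [pvAdj, if_pos h, List.tail_cons, List.zip_cons_cons,
        List.filter_cons, List.getLast_cons (by simp : (b :: t) ≠ [])]
      rw [if_pos (by simpa using h)]
      simpa using ih

theorem pvSlice_tail (vs : List Int) :
    PySem.List.slice vs (some 1) (some (PySem.List.len vs)) = vs.tail := by
  have h1 : (1 : Int) = ((1 : Nat) : Int) := by norm_num
  rw [PySem.List.len_eq, h1, PySem.List.slice_natCast]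
  cases vs with
  | nil => simp
  | cons a t => simp

theorem unique_sorted_eq_pvAdj (values : List Int) :
    unique_sorted values = pvAdj (PySem.List.sorted values (fun x => x) false) := by
  unfold unique_sorted
  set vs := PySem.List.sorted values (fun x => x) false with hvs
  by_cases h : vs = []
  · simp [h, pvAdj]
  · rw [if_neg h, pvSlice_tail, PySem.List.pyGetD_neg_one (h := h)]
    simpa using pvAdj_eq_zip vs h

-- ===== VERDICT (by name: the statement is the Claim_ definition above) =====
theorem unique_sorted_spec : Claim_equal_unique_sorted := by
  intro values _
  show unique_sorted values = unique_sorted_alt values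
  rw [unique_sorted_eq_pvAdj]
  unfold unique_sorted_alt
  set vs := PySem.List.sorted values (fun x => x) false with hvs
  have hsorted : vs.Pairwise (· ≤ ·) := by
    simpa using PySem.List.sorted_pairwise (xs := values) (key := fun x => x)
  have hlt : (pvAdj vs).Pairwise (· < ·) := pvAdj_pairwise vs hsorted
  refine (PySem.List.sorted_eq_of_perm_of_pairwise_lt _ _ _ ?_ hlt).symm
  refine (List.perm_ext_iff_of_nodup (hlt.imp fun h => ne_of_lt h)
    (PySem.Set.nodup_ofList values)).mpr ?_
  intro x
  rw [pvAdj_mem, hvs, PySem.List.mem_sorted, PySem.Set.mem_ofList]
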